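-- pv_equiv track=rewrite | github.com/nexodifyforyou/perizia-v5-after-gpt | backend/evidence_utils.py | _find_left_boundary
-- ===== SOURCE A (Python) =====
-- _SENTENCE_BOUNDARY_CHARS = ".;:?!"
--
-- def _find_left_boundary(text: str, start: int) -> int:
--     s = max(0, min(start, len(text)))
--     for i in range(s - 1, -1, -1):
--         if text[i] in _SENTENCE_BOUNDARY_CHARS:
--             return i + 1
--     nl = text.rfind("\n", 0, s)
--     if nl >= 0:
--         return nl + 1
--     for i in range(s - 1, -1, -1):
--         if text[i].isspace():
--             return i + 1
--     return 0
-- ===== SOURCE B (Python) =====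
-- _SENTENCE_BOUNDARY_CHARS = ".;:?!"
--
-- def _find_left_boundary(text: str, start: int) -> int:
--     # Single forward pass tracking the last occurrence of each kind of break,
--     # instead of A's up-to-three backward scans.
--     s = max(0, min(start, len(text)))
--     last_boundary = last_newline = last_space = -1
--     for i in range(s):
--         ch = text[i]
--         if ch in _SENTENCE_BOUNDARY_CHARS:
--             last_boundary = i
--         if ch == "\n":
--             last_newline = i
--         if ch.isspace():
--             last_space = i
--     if last_boundary >= 0:
--         return last_boundary + 1
--     if last_newline >= 0:
--         return last_newline + 1
--     if last_space >= 0: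
--         return last_space + 1
--     return 0
-- ===== Notes on version B (the rewrite author's own statement) =====
-- stated objective: alternative
-- what changed: Replaces A's three separate backward scans (boundary chars, rfind of newline, whitespace) with one forward pass that tracks the last index of each kind of break and then applies the same priority order.
import Mathlib
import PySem

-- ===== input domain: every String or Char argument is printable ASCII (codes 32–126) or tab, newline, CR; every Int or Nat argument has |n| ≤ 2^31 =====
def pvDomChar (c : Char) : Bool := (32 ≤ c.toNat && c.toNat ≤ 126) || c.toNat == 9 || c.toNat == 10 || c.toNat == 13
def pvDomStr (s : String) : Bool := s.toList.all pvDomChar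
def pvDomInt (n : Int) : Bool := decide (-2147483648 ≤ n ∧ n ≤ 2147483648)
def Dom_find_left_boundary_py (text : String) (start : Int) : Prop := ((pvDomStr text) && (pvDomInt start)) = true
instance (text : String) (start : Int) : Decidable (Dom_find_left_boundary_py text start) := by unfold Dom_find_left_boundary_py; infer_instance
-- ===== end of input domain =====

-- B replaces A's three backward scans (boundary chars, rfind of '\n', whitespace) with one
-- forward pass tracking the last index of each kind of break; same priority, same result.


-- ===== PORT A =====
-- 'c in ".;:?!"' for a single character = membership in that character set (exact)
def pvBoundaryChar (c : Char) : Bool := c == '.' || c == ';' || c == ':' || c == '?' || c == '!'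

-- 'for i in range(k-1, -1, -1): if pred(text[i]): return i+1' — backward first-match scan;
-- the index k-1 is always in range, so getD never takes its default inside the loop
def pvScanDown (cs : List Char) (pred : Char → Bool) : Nat → Option Nat
  | 0 => none
  | k + 1 => if pred (cs.getD k ' ') then some k else pvScanDown cs pred k

def find_left_boundary_py (text : String) (start : Int) : Int :=
  let cs := text.toList
  let s : Nat := (max 0 (min start (cs.length : Int))).toNat
  match pvScanDown cs pvBoundaryChar s with
  | some i => (i : Int) + 1
  | none =>
    -- text.rfind("\n", 0, s): ported by hand as a backward scan for '\n' below s (exact for a 1-char needle)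
    match pvScanDown cs (fun c => c == '\n') s with
    | some nl => (nl : Int) + 1
    | none =>
      match pvScanDown cs (fun c => PySem.Chars.isspace c) s with
      | some i => (i : Int) + 1
      | none => 0

-- ===== PORT B =====
-- one forward step of Source B's loop: update the three 'last seen' indices
def pvStepB (cs : List Char) (acc : Int × Int × Int) (i : Nat) : Int × Int × Int :=
  let ch := cs.getD i ' '
  ((if pvBoundaryChar ch then (i : Int) else acc.1),
   (if ch == '\n' then (i : Int) else acc.2.1),
   (if PySem.Chars.isspace ch then (i : Int) else acc.2.2))

def find_left_boundary_py_alt (text : String) (start : Int) : Int :=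
  let cs := text.toList
  let s : Nat := (max 0 (min start (cs.length : Int))).toNat
  let r := (List.range s).foldl (pvStepB cs) (-1, -1, -1)
  if r.1 ≥ 0 then r.1 + 1
  else if r.2.1 ≥ 0 then r.2.1 + 1
  else if r.2.2 ≥ 0 then r.2.2 + 1
  else 0

-- ===== PRECONDITION & SPEC =====
def Spec_find_left_boundary_py (text : String) (start : Int) (out : Int) : Prop := out = find_left_boundary_py_alt text start
instance (text : String) (start : Int) (out : Int) : Decidable (Spec_find_left_boundary_py text start out) := by unfold Spec_find_left_boundary_py; infer_instance

-- ===== CLAIM (what is proved, stated in full; the proofs are below) =====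
def Claim_equal_find_left_boundary_py : Prop := ∀ (text : String) (start : Int), Dom_find_left_boundary_py text start → Spec_find_left_boundary_py text start (find_left_boundary_py text start)

-- ===== LEMMAS AND PROOFS =====

-- the single-predicate forward fold Source B's loop performs on each component
def pvLast (cs : List Char) (pred : Char → Bool) (k : Nat) : Int :=
  (List.range k).foldl (fun a i => if pred (cs.getD i ' ') then (i : Int) else a) (-1)

lemma pvFoldB_eq_components (cs : List Char) (k : Nat) :
    (List.range k).foldl (pvStepB cs) (-1, -1, -1) =
      (pvLast cs pvBoundaryChar k, pvLast cs (fun c => c == '\n') k,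
       pvLast cs (fun c => PySem.Chars.isspace c) k) := by
  induction k with
  | zero => simp [pvLast]
  | succ n ih =>
    simp [List.range_succ, pvLast, List.foldl_append] at *
    rw [ih]
    simp [pvStepB]

lemma pvLast_eq_scan (cs : List Char) (pred : Char → Bool) (k : Nat) :
    pvLast cs pred k = match pvScanDown cs pred k with
      | some i => (i : Int)
      | none => -1 := by
  induction k with
  | zero => simp [pvLast, pvScanDown]
  | succ n ih =>
    have step : pvLast cs pred (n + 1) =
        if pred (cs.getD n ' ') then (n : Int) else pvLast cs pred n := by
      simp [pvLast, List.range_succ, List.foldl_append]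
    rw [step, pvScanDown]
    by_cases h : pred (cs.getD n ' ')
    · rw [if_pos h, if_pos h]
    · rw [if_neg h, if_neg h, ih]

-- ===== VERDICT (by name: the statement is the Claim_ definition above) =====
theorem find_left_boundary_py_spec : Claim_equal_find_left_boundary_py := by
  intro text start _
  unfold Spec_find_left_boundary_py find_left_boundary_py find_left_boundary_py_alt
  simp only []
  set cs := text.toList
  set s : Nat := (max 0 (min start (cs.length : Int))).toNat with hs
  rw [pvFoldB_eq_components]
  rw [pvLast_eq_scan, pvLast_eq_scan, pvLast_eq_scan]
  rcases h1 : pvScanDown cs pvBoundaryChar s with _ | i <;>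
  rcases h2 : pvScanDown cs (fun c => c == '\n') s with _ | j <;>
  rcases h3 : pvScanDown cs (fun c => PySem.Chars.isspace c) s with _ | l <;>
  simp <;> omega
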